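-- pv_equiv track=rewrite | github.com/Billccx/leetcode | 剑指/表示数值的字符串/表示数值的字符串.py | checkInt
-- ===== SOURCE A (Python) =====
-- def checkInt(st: str) -> bool:
--     s=st
--     if(len(s)==0):return False
--     if s[0]=='+' or s[0]=='-' or (s[0]>='0' and s[0]<='9'):
--         if s[0]=='+' or s[0]=='-':
--             s=s[1:]
--         if s=="":return False
--         for item in s:
--             if item<'0' or item>'9':
--                 return False
--         return True
--     else:
--         return False
-- ===== SOURCE B (Python) =====
-- import re
--
-- _INT_RE = re.compile(r'[+-]?[0-9]+')
--
-- def checkInt(st: str) -> bool: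
--     return bool(_INT_RE.fullmatch(st))
-- ===== Notes on version B (the rewrite author's own statement) =====
-- stated objective: idiomatic
-- what changed: The hand-written first-char branching and explicit digit loop are replaced by a single regex full-match of the pattern [+-]?[0-9]+ by the standard-library pattern engine.
import Mathlib
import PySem

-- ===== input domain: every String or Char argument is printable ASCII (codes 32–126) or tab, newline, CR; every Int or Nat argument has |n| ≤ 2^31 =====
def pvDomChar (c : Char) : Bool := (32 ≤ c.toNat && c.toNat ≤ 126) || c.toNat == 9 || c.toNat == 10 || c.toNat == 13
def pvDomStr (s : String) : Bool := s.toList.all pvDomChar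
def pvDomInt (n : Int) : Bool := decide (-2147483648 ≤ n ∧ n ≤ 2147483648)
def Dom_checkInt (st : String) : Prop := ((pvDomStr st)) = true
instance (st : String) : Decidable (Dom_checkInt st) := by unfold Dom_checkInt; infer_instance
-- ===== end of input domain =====

-- B replaces A's hand-written sign branch + digit loop by one regex full-match of [+-]?[0-9]+ (idiomatic; same cost).

-- ===== PORT A =====
-- the `for item in s: if item<'0' or item>'9': return False` loop, then `return True`
def checkIntLoop : List Char → Bool
  | [] => true
  | c :: r => if c < '0' ∨ c > '9' then false else checkIntLoop r

def checkInt (st : String) : Bool :=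
  let s := st.toList
  if s.length = 0 then false
  else
    match s with
    | [] => false  -- unreachable: length ≠ 0
    | c0 :: rest =>
      if c0 = '+' ∨ c0 = '-' ∨ ('0' ≤ c0 ∧ c0 ≤ '9') then
        let s' := if c0 = '+' ∨ c0 = '-' then rest else c0 :: rest  -- s = s[1:] on a sign
        if s' = [] then false else checkIntLoop s'
      else false

-- ===== PORT B =====
-- the regex atom [0-9]+ : one-or-more ASCII digits
def reDigits1 (xs : List Char) : Bool := !xs.isEmpty && xs.all (fun c => '0' ≤ c ∧ c ≤ '9')

-- fullmatch of [+-]?[0-9]+ : optionally consume a sign, then the rest must match [0-9]+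
def checkInt_alt (st : String) : Bool :=
  match st.toList with
  | [] => false
  | c :: rest => if c = '+' || c = '-' then reDigits1 rest else reDigits1 (c :: rest)

-- ===== PRECONDITION & SPEC =====
def Spec_checkInt (st : String) (out : Bool) : Prop := out = checkInt_alt st
instance (st : String) (out : Bool) : Decidable (Spec_checkInt st out) := by unfold Spec_checkInt; infer_instance

-- ===== CLAIM (what is proved, stated in full; the proofs are below) =====
def Claim_equal_checkInt : Prop := ∀ (st : String), Dom_checkInt st → Spec_checkInt st (checkInt st)

-- ===== LEMMAS AND PROOFS =====
theorem checkIntLoop_eq_all (xs : List Char) :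
    checkIntLoop xs = xs.all (fun c => '0' ≤ c ∧ c ≤ '9') := by
  induction xs with
  | nil => rfl
  | cons c r ih =>
    simp only [checkIntLoop, List.all_cons, ih]
    by_cases h : c < '0' ∨ c > '9'
    · rw [if_pos h]
      rcases h with h | h
      · simp [not_le.mpr h]
      · simp [not_le.mpr h]
    · rw [if_neg h]
      rw [not_or] at h
      simp [not_lt.mp h.1, not_lt.mp h.2]

-- ===== VERDICT (by name: the statement is the Claim_ definition above) =====
theorem checkInt_spec : Claim_equal_checkInt := by
  intro st _
  unfold Spec_checkInt checkInt checkInt_alt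
  cases hl : st.toList with
  | nil => simp
  | cons c0 rest =>
    simp only [List.length_cons]
    rw [if_neg (by omega)]
    by_cases hsign : c0 = '+' ∨ c0 = '-'
    · rw [if_pos (by tauto), if_pos hsign]
      have : (c0 = '+' || c0 = '-') = true := by
        rcases hsign with h | h <;> simp [h]
      rw [this, if_pos rfl]
      cases rest with
      | nil => simp [reDigits1]
      | cons d r => simp [reDigits1, checkIntLoop_eq_all]
    · rw [not_or] at hsign
      have hs : (c0 = '+' || c0 = '-') = false := by
        simp [hsign.1, hsign.2]
      rw [hs]
      simp only [Bool.false_eq_true, if_false]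
      by_cases hd : '0' ≤ c0 ∧ c0 ≤ '9'
      · rw [if_pos (Or.inr (Or.inr hd)),
           if_neg (show ¬(c0 = '+' ∨ c0 = '-') from not_or.mpr hsign)]
        simp [reDigits1, checkIntLoop_eq_all]
      · rw [if_neg (by tauto)]
        rcases not_and_or.mp hd with h | h
        · simp [reDigits1, not_le.mp (by simpa using h)]
        · simp [reDigits1, not_le.mp (by simpa using h)]
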